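-- pv_equiv track=rewrite | github.com/vamsiperumallu/AlgorithmSnippets | CountMaximumTeams/CountMaximumTeams.py | countMaximumTeams
-- ===== SOURCE A (Python) =====
-- def countMaximumTeams(skill, teamSize, maxDiff):
--
--     #Sort the skill list to ensure minumum comparisions and not to repeat same checks
--     skill.sort()
--
--     #i is index for the team member with minimum skill
--     #cnt is to track the number of teams that can be formed
--     i = cnt = 0
--     j = teamSize - 1  #j helps to extract one team(with teamSize) in 1 iteratiom
--     len1 = len(skill)
--
--     while(j < len1):
--
--         #compare minimum skilled team member (i) with maximum skilled team member (j)
--         if(skill[j] - skill[i] <= maxDiff):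
--             cnt += 1                                #Increase the team formation count
--             i = j + 1                               #Increase i to 1 beyond j to start searching for new team
--             j = i + teamSize - 1                    #Increase j to new team maximum skilled member
--         else:                                       #case when team cannot be formed with i, j combination
--             i += 1                                  #Increment i to the next team member
--             j += 1                                  #Increment j to the next team member
--     return cnt
-- ===== SOURCE B (Python) =====
-- def countMaximumTeams(skill, teamSize, maxDiff):
--     # Greedy over team starts with a BINARY-SEARCH JUMP (return-value equivalence;
--     # like A, this sorts the caller's list in place).
--     skill.sort()
--     n = len(skill)
--     cnt = 0
--     i = 0
--     while i + teamSize - 1 < n: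
--         hi_val = skill[i + teamSize - 1]
--         if hi_val - skill[i] <= maxDiff:
--             cnt += 1
--             i += teamSize
--         else:
--             # every start s with skill[s] < hi_val - maxDiff also fails (its window
--             # end value is >= hi_val); binary-search the first index that could work
--             target = hi_val - maxDiff
--             lo, hi = i + 1, n
--             while lo < hi:
--                 mid = (lo + hi) // 2
--                 if skill[mid] < target:
--                     lo = mid + 1
--                 else:
--                     hi = mid
--             i = lo
--     return cnt
-- ===== Notes on version B (the rewrite author's own statement) =====
-- stated objective: alternative
-- what changed: Replaces A's two-pointer pass (both endpoints advanced one step per failed window) by a greedy over team starts that, on a failed window, jumps the start directly with a hand-written binary search for the first element >= skill[end]-maxDiff, skipping all provably-failing starts at once.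
import Mathlib
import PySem

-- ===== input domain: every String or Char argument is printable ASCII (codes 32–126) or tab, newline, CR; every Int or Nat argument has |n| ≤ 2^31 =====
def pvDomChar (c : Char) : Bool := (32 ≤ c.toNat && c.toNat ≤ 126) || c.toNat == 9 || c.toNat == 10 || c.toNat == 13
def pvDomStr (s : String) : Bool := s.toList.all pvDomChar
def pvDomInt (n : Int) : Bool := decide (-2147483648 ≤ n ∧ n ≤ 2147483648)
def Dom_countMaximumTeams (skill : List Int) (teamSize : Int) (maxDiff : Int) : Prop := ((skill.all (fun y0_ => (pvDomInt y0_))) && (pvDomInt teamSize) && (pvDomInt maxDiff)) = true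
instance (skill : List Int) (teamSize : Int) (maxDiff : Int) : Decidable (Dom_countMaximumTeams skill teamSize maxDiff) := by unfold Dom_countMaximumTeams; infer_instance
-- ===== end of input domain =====

-- B replaces A's two-pointer window slide by a greedy over team starts that jumps the start
-- with a binary search on a failed window (alternative algorithm, same O(n log n) cost).
-- Like A, it sorts the list in place; the equivalence proved here is about the return value.

-- ===== PORT A =====
-- skill[t] for an index that is in range whenever Pre_ holds (teamSize ≥ 1 keeps 0 ≤ i ≤ j < len);
-- exact there (PySem.List.pyGetD is exact under Raise.InRange).
def pvAt (ys : List Int) (t : Int) : Int := PySem.List.pyGetD ys t 0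

-- the while loop of A; fuel only for termination (under Pre_, j grows by ≥ 1 per iteration, so
-- ys.length + 1 fuel is never exhausted)
def pvLoopA (ys : List Int) (k : Int) (d : Int) : Nat → Int → Int → Int → Int
  | 0, _, _, cnt => cnt
  | fuel+1, i, j, cnt =>
    if j < PySem.List.len ys then
      if pvAt ys j - pvAt ys i ≤ d then
        pvLoopA ys k d fuel (j+1) (j+k) (cnt+1)
      else
        pvLoopA ys k d fuel (i+1) (j+1) cnt
    else cnt

def countMaximumTeams (skill : List Int) (teamSize : Int) (maxDiff : Int) : Int :=
  let ys := PySem.List.sorted skill (fun x => x) false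
  pvLoopA ys teamSize maxDiff (ys.length + 1) 0 (teamSize - 1) 0

-- ===== PORT B =====
-- midpoint bounds for the binary search (cited by pvBisect's decreasing_by)
lemma pvMidBounds (lo hi : Int) (h : lo < hi) :
    lo ≤ PySem.Int.floordiv (lo + hi) 2 ∧ PySem.Int.floordiv (lo + hi) 2 < hi := by
  constructor
  · rw [PySem.Int.le_floordiv_iff_mul_le (by omega)]; omega
  · rw [PySem.Int.floordiv_lt_iff_lt_mul (by omega)]; omega

-- B's inner while loop: hand-written bisect_left for `target` on ys within [lo, hi)
def pvBisect (ys : List Int) (target : Int) (lo hi : Int) : Int :=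
  if h : lo < hi then
    let mid := PySem.Int.floordiv (lo + hi) 2
    if pvAt ys mid < target then pvBisect ys target (mid + 1) hi
    else pvBisect ys target lo mid
  else lo
termination_by (hi - lo).toNat
decreasing_by
  · have := pvMidBounds lo hi h; omega
  · have := pvMidBounds lo hi h; omega

-- B's outer while loop; fuel only for termination (under Pre_, i grows by ≥ 1 per iteration)
def pvLoopB (ys : List Int) (k : Int) (d : Int) : Nat → Int → Int → Int
  | 0, _, cnt => cnt
  | fuel+1, i, cnt =>
    if i + k - 1 < (ys.length : Int) then
      let hiv := pvAt ys (i + k - 1)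
      if hiv - pvAt ys i ≤ d then
        pvLoopB ys k d fuel (i + k) (cnt + 1)
      else
        pvLoopB ys k d fuel (pvBisect ys (hiv - d) (i + 1) (ys.length : Int)) cnt
    else cnt

def countMaximumTeams_alt (skill : List Int) (teamSize : Int) (maxDiff : Int) : Int :=
  let ys := PySem.List.sorted skill (fun x => x) false
  pvLoopB ys teamSize maxDiff (ys.length + 1) 0 0

-- ===== PRECONDITION & SPEC =====
-- Pre_ excludes no input on which A returns: for teamSize ≤ 0 the Python A never returns
-- (the window has nonpositive width, so the loop either indexes out of range — IndexError —
-- or cycles forever without advancing past the end).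
def Pre_countMaximumTeams (skill : List Int) (teamSize : Int) (maxDiff : Int) : Prop :=
  1 ≤ teamSize
instance (skill : List Int) (teamSize : Int) (maxDiff : Int) : Decidable (Pre_countMaximumTeams skill teamSize maxDiff) := by unfold Pre_countMaximumTeams; infer_instance

def pvWitness_countMaximumTeams : List Int × Int × Int := ([5, 1, 2], 2, 3)

def Spec_countMaximumTeams (skill : List Int) (teamSize : Int) (maxDiff : Int) (out : Int) : Prop := out = countMaximumTeams_alt skill teamSize maxDiff
instance (skill : List Int) (teamSize : Int) (maxDiff : Int) (out : Int) : Decidable (Spec_countMaximumTeams skill teamSize maxDiff out) := by unfold Spec_countMaximumTeams; infer_instance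

-- ===== CLAIM (what is proved, stated in full; the proofs are below) =====
def Claim_equal_countMaximumTeams : Prop := ∀ (skill : List Int) (teamSize : Int) (maxDiff : Int), Dom_countMaximumTeams skill teamSize maxDiff → Pre_countMaximumTeams skill teamSize maxDiff → Spec_countMaximumTeams skill teamSize maxDiff (countMaximumTeams skill teamSize maxDiff)

-- ===== LEMMAS AND PROOFS =====

-- Common per-endpoint reformulation: state (s, cnt); at endpoint r a team forms iff the current
-- start s has reached r - k + 1 and the fixed window [r-k+1, r] fits within d.
def pvStepA (ys : List Int) (k : Int) (d : Int) (st : Int × Int) (r : Int) : Int × Int :=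
  if st.1 ≤ r - k + 1 ∧ pvAt ys r - pvAt ys (r - k + 1) ≤ d then (r + 1, st.2 + 1) else st

-- general no-op segment: every endpoint in [a,b) fails the step condition
lemma pvStepA_noop' (ys : List Int) (k d : Int) :
    ∀ (m : Nat) (a b s c : Int), b ≤ a + m →
      (∀ r : Int, a ≤ r → r < b → ¬ (s ≤ r - k + 1 ∧ pvAt ys r - pvAt ys (r - k + 1) ≤ d)) →
      (PySem.List.pyRange a b 1).foldl (pvStepA ys k d) (s, c) = (s, c) := by
  intro m
  induction m with
  | zero =>
    intro a b s c hm _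
    rw [PySem.List.pyRange_one_eq_nil (by omega)]
    rfl
  | succ m ih =>
    intro a b s c hm hfail
    by_cases hab : a < b
    · rw [PySem.List.pyRange_one_cons hab]
      simp only [List.foldl_cons]
      have hno : pvStepA ys k d (s, c) a = (s, c) := by
        unfold pvStepA
        rw [if_neg (hfail a le_rfl hab)]
      rw [hno]
      exact ih (a+1) b s c (by omega) (fun r h1 h2 => hfail r (by omega) h2)
    · rw [PySem.List.pyRange_one_eq_nil (by omega)]
      rfl

lemma pvStepA_noop (ys : List Int) (k d : Int) :
    ∀ (m : Nat) (a b s c : Int), b ≤ a + m → b ≤ s + k - 1 →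
      (PySem.List.pyRange a b 1).foldl (pvStepA ys k d) (s, c) = (s, c) := by
  intro m a b s c hm hb
  exact pvStepA_noop' ys k d m a b s c hm (fun r h1 h2 hcon => by omega)

lemma pvStepA_cong (ys : List Int) (k d : Int) :
    ∀ (m : Nat) (a s s' c : Int), (ys.length : Int) ≤ a + m → s ≤ s' → s' + k - 1 ≤ a →
      ((PySem.List.pyRange a (ys.length : Int) 1).foldl (pvStepA ys k d) (s, c)).2
        = ((PySem.List.pyRange a (ys.length : Int) 1).foldl (pvStepA ys k d) (s', c)).2 := by
  intro m
  induction m with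
  | zero =>
    intro a s s' c hm hss hsa
    rw [PySem.List.pyRange_one_eq_nil (by omega)]; rfl
  | succ m ih =>
    intro a s s' c hm hss hsa
    by_cases hab : a < (ys.length : Int)
    · rw [PySem.List.pyRange_one_cons hab]
      simp only [List.foldl_cons]
      by_cases hd : pvAt ys a - pvAt ys (a - k + 1) ≤ d
      · have h1 : pvStepA ys k d (s, c) a = (a + 1, c + 1) := by
          unfold pvStepA; rw [if_pos ⟨by omega, hd⟩]
        have h2 : pvStepA ys k d (s', c) a = (a + 1, c + 1) := by
          unfold pvStepA; rw [if_pos ⟨by omega, hd⟩]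
        rw [h1, h2]
      · have h1 : pvStepA ys k d (s, c) a = (s, c) := by
          unfold pvStepA; rw [if_neg (by intro hcon; exact hd hcon.2)]
        have h2 : pvStepA ys k d (s', c) a = (s', c) := by
          unfold pvStepA; rw [if_neg (by intro hcon; exact hd hcon.2)]
        rw [h1, h2]
        exact ih (a+1) s s' c (by omega) hss (by omega)
    · rw [PySem.List.pyRange_one_eq_nil (by omega)]; rfl

lemma pvLoopA_eq_fold (ys : List Int) (k d : Int) (hk : 1 ≤ k) :
    ∀ (fuel : Nat) (i cnt : Int), 0 ≤ i → (ys.length : Int) ≤ i + k - 1 + fuel →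
      pvLoopA ys k d fuel i (i + k - 1) cnt
        = ((PySem.List.pyRange (i + k - 1) (ys.length : Int) 1).foldl (pvStepA ys k d) (i, cnt)).2 := by
  intro fuel
  induction fuel with
  | zero =>
    intro i cnt hi hf
    rw [PySem.List.pyRange_one_eq_nil (by omega)]
    rfl
  | succ fuel ih =>
    intro i cnt hi hf
    by_cases hj : i + k - 1 < (ys.length : Int)
    · rw [PySem.List.pyRange_one_cons hj]
      simp only [List.foldl_cons]
      have hik : i + k - 1 - k + 1 = i := by ring
      by_cases hd : pvAt ys (i + k - 1) - pvAt ys i ≤ d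
      · -- team formed
        have hstep : pvStepA ys k d (i, cnt) (i + k - 1) = (i + k, cnt + 1) := by
          unfold pvStepA
          rw [hik, if_pos ⟨by omega, hd⟩]
          rw [Prod.mk.injEq]
          exact ⟨by ring, rfl⟩
        rw [hstep]
        rw [show i + k - 1 + 1 = i + k from by ring]
        have hl : pvLoopA ys k d (fuel+1) i (i + k - 1) cnt
            = pvLoopA ys k d fuel (i + k) ((i + k) + k - 1) (cnt + 1) := by
          show (if (i + k - 1) < PySem.List.len ys then _ else _) = _
          rw [if_pos (by simp [PySem.List.len_eq]; omega), if_pos hd]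
          congr 1
          all_goals ring
        rw [hl, ih (i + k) (cnt + 1) (by omega) (by omega)]
        by_cases hn : i + k + k - 1 ≤ (ys.length : Int)
        · rw [PySem.List.pyRange_one_append (i+k) (i+k+k-1) (ys.length : Int) (by omega) (by omega)]
          rw [List.foldl_append]
          rw [pvStepA_noop ys k d (k-1).toNat (i+k) (i+k+k-1) (i+k) (cnt+1) (by omega) (by omega)]
        · rw [PySem.List.pyRange_one_eq_nil (le_of_lt (by omega)),
              pvStepA_noop ys k d fuel (i+k) (ys.length : Int) (i+k) (cnt+1) (by omega) (by omega)]
          rfl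
      · -- slide window
        have hstep : pvStepA ys k d (i, cnt) (i + k - 1) = (i, cnt) := by
          unfold pvStepA
          rw [hik, if_neg (by intro hcon; exact hd hcon.2)]
        rw [hstep]
        have hl : pvLoopA ys k d (fuel+1) i (i + k - 1) cnt
            = pvLoopA ys k d fuel (i + 1) ((i + 1) + k - 1) cnt := by
          show (if (i + k - 1) < PySem.List.len ys then _ else _) = _
          rw [if_pos (by simp [PySem.List.len_eq]; omega), if_neg hd]
          congr 1
          all_goals ring
        rw [hl, ih (i + 1) cnt (by omega) (by omega)]
        rw [show i + 1 + k - 1 = i + k from by ring, show i + k - 1 + 1 = i + k from by ring]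
        exact (pvStepA_cong ys k d fuel (i+k) i (i+1) cnt (by omega) (by omega) (by omega)).symm
    · have : pvLoopA ys k d (fuel+1) i (i + k - 1) cnt = cnt := by
        show (if (i + k - 1) < PySem.List.len ys then _ else _) = _
        rw [if_neg (by simp [PySem.List.len_eq]; omega)]
      rw [this, PySem.List.pyRange_one_eq_nil (by omega)]
      rfl

-- bisect facts
lemma pvBisect_ge (ys : List Int) (t lo hi : Int) : lo ≤ pvBisect ys t lo hi := by
  fun_induction pvBisect with
  | case1 lo hi h mid hlt ih =>
    have := pvMidBounds lo hi h; omega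
  | case2 lo hi h mid hlt ih =>
    exact ih
  | case3 lo hi h => omega

lemma pvBisect_le (ys : List Int) (t lo hi : Int) (hlh : lo ≤ hi) : pvBisect ys t lo hi ≤ hi := by
  fun_induction pvBisect with
  | case1 lo hi h mid hlt ih =>
    have := pvMidBounds lo hi h; exact ih (by omega)
  | case2 lo hi h mid hlt ih =>
    have hm := pvMidBounds lo hi h
    have := ih (by omega)
    omega
  | case3 lo hi h => omega

lemma pvBisect_below (ys : List Int) (t : Int)
    (hmono : ∀ a b : Int, 0 ≤ a → a ≤ b → b < (ys.length : Int) → pvAt ys a ≤ pvAt ys b) :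
    ∀ lo hi : Int, 0 ≤ lo → hi ≤ (ys.length : Int) →
      ∀ x : Int, lo ≤ x → x < pvBisect ys t lo hi → pvAt ys x < t := by
  intro lo hi
  fun_induction pvBisect ys t lo hi with
  | case1 lo hi h mid hlt ih =>
    intro hlo hhi x hx1 hx2
    have hm := pvMidBounds lo hi h
    by_cases hxm : x ≤ mid
    · have := hmono x mid (by omega) hxm (by omega)
      omega
    · exact ih (by omega) hhi x (by omega) hx2
  | case2 lo hi h mid hlt ih =>
    intro hlo hhi x hx1 hx2
    have hm := pvMidBounds lo hi h
    exact ih hlo (by omega) x hx1 hx2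
  | case3 lo hi h =>
    intro _ _ x hx1 hx2; omega

-- main simulation: B's jump greedy and the per-endpoint fold agree
lemma pvLoopB_eq_fold (ys : List Int) (k d : Int) (hk : 1 ≤ k)
    (hmono : ∀ a b : Int, 0 ≤ a → a ≤ b → b < (ys.length : Int) → pvAt ys a ≤ pvAt ys b) :
    ∀ (fuel : Nat) (i cnt : Int), 0 ≤ i → (ys.length : Int) ≤ i + k - 1 + fuel →
      pvLoopB ys k d fuel i cnt
        = ((PySem.List.pyRange (i + k - 1) (ys.length : Int) 1).foldl (pvStepA ys k d) (i, cnt)).2 := by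
  intro fuel
  induction fuel with
  | zero =>
    intro i cnt hi hf
    rw [PySem.List.pyRange_one_eq_nil (by omega)]
    rfl
  | succ fuel ih =>
    intro i cnt hi hf
    by_cases hj : i + k - 1 < (ys.length : Int)
    · rw [PySem.List.pyRange_one_cons hj]
      simp only [List.foldl_cons]
      have hik : i + k - 1 - k + 1 = i := by ring
      by_cases hd : pvAt ys (i + k - 1) - pvAt ys i ≤ d
      · -- team formed: identical to A's success step
        have hstep : pvStepA ys k d (i, cnt) (i + k - 1) = (i + k, cnt + 1) := by
          unfold pvStepA
          rw [hik, if_pos ⟨by omega, hd⟩]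
          rw [Prod.mk.injEq]
          exact ⟨by ring, rfl⟩
        rw [hstep]
        rw [show i + k - 1 + 1 = i + k from by ring]
        have hl : pvLoopB ys k d (fuel+1) i cnt = pvLoopB ys k d fuel (i + k) (cnt + 1) := by
          show (if i + k - 1 < (ys.length : Int) then _ else _) = _
          rw [if_pos hj, if_pos hd]
        rw [hl, ih (i + k) (cnt + 1) (by omega) (by omega)]
        by_cases hn : i + k + k - 1 ≤ (ys.length : Int)
        · rw [PySem.List.pyRange_one_append (i+k) (i+k+k-1) (ys.length : Int) (by omega) (by omega)]
          rw [List.foldl_append]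
          rw [pvStepA_noop ys k d (k-1).toNat (i+k) (i+k+k-1) (i+k) (cnt+1) (by omega) (by omega)]
        · rw [PySem.List.pyRange_one_eq_nil (le_of_lt (by omega)),
              pvStepA_noop ys k d fuel (i+k) (ys.length : Int) (i+k) (cnt+1) (by omega) (by omega)]
          rfl
      · -- window fails: B jumps i to the bisect result s0; every start in [i, s0) also fails
        set hiv := pvAt ys (i + k - 1) with hhiv
        set s0 := pvBisect ys (hiv - d) (i + 1) (ys.length : Int) with hs0
        have hs0ge : i + 1 ≤ s0 := pvBisect_ge ys (hiv - d) (i + 1) (ys.length : Int)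
        have hs0le : s0 ≤ (ys.length : Int) := pvBisect_le ys (hiv - d) (i + 1) (ys.length : Int) (by omega)
        have hbelow : ∀ x : Int, i + 1 ≤ x → x < s0 → pvAt ys x < hiv - d :=
          pvBisect_below ys (hiv - d) hmono (i + 1) (ys.length : Int) (by omega) le_rfl
        have hstep : pvStepA ys k d (i, cnt) (i + k - 1) = (i, cnt) := by
          unfold pvStepA
          rw [hik, if_neg (by intro hcon; exact hd hcon.2)]
        rw [hstep]
        have hl : pvLoopB ys k d (fuel+1) i cnt = pvLoopB ys k d fuel s0 cnt := by
          show (if i + k - 1 < (ys.length : Int) then _ else _) = _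
          rw [if_pos hj, if_neg hd]
        rw [hl, ih s0 cnt (by omega) (by omega)]
        -- every endpoint r in [i+k, s0+k-1) fails for state start i: its start r-k+1 ∈ [i+1, s0)
        have hfail : ∀ r : Int, i + k ≤ r → r < (ys.length : Int) → r < s0 + k - 1 →
            ¬ ((i : Int) ≤ r - k + 1 ∧ pvAt ys r - pvAt ys (r - k + 1) ≤ d) := by
          intro r h1 h2 h3 hcon
          have hlow : pvAt ys (r - k + 1) < hiv - d := hbelow (r - k + 1) (by omega) (by omega)
          have hge : hiv ≤ pvAt ys r := hmono (i + k - 1) r (by omega) (by omega) h2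
          omega
        rw [show i + k - 1 + 1 = i + k from by ring]
        by_cases hn : s0 + k - 1 ≤ (ys.length : Int)
        · rw [PySem.List.pyRange_one_append (i+k) (s0+k-1) (ys.length : Int) (by omega) hn]
          rw [List.foldl_append]
          rw [pvStepA_noop' ys k d (s0 + k - 1 - (i + k)).toNat (i+k) (s0+k-1) i cnt (by omega)
              (fun r h1 h2 => hfail r h1 (by omega) h2)]
          exact (pvStepA_cong ys k d fuel (s0+k-1) i s0 cnt (by omega) (by omega) (by omega)).symm
        · rw [pvStepA_noop' ys k d fuel (i+k) (ys.length : Int) i cnt (by omega)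
              (fun r h1 h2 => hfail r h1 h2 (by omega)),
              PySem.List.pyRange_one_eq_nil (by omega : (ys.length : Int) ≤ s0 + k - 1)]
          rfl
    · have : pvLoopB ys k d (fuel+1) i cnt = cnt := by
        show (if i + k - 1 < (ys.length : Int) then _ else _) = _
        rw [if_neg hj]
      rw [this, PySem.List.pyRange_one_eq_nil (by omega)]
      rfl

lemma pvSorted_mono (skill : List Int) :
    ∀ a b : Int, 0 ≤ a → a ≤ b → b < ((PySem.List.sorted skill (fun x => x) false).length : Int) →
      pvAt (PySem.List.sorted skill (fun x => x) false) a ≤ pvAt (PySem.List.sorted skill (fun x => x) false) b := by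
  intro a b ha hab hb
  unfold pvAt
  rw [PySem.List.pyGetD_eq_getElem _ (0:Int) ha (by omega),
      PySem.List.pyGetD_eq_getElem _ (0:Int) (by omega : (0:Int) ≤ b) hb]
  exact PySem.List.sorted_id_getElem_mono skill (by omega) (by omega)

-- ===== VERDICT (by name: the statement is the Claim_ definition above) =====
theorem countMaximumTeams_spec : Claim_equal_countMaximumTeams := by
  unfold Claim_equal_countMaximumTeams
  intro skill k d hdom hpre
  have hk : 1 ≤ k := hpre
  unfold Spec_countMaximumTeams
  simp only [countMaximumTeams, countMaximumTeams_alt]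
  set ys := PySem.List.sorted skill (fun x => x) false with hys
  have hA := pvLoopA_eq_fold ys k d hk (ys.length + 1) 0 0 le_rfl (by push_cast; omega)
  have hB := pvLoopB_eq_fold ys k d hk (pvSorted_mono skill) (ys.length + 1) 0 0 le_rfl (by push_cast; omega)
  rw [show (0:Int) + k - 1 = k - 1 from by ring] at hA hB
  rw [hA, hB]
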